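-- pv_equiv track=rewrite | github.com/commaaander/code_wars | src/catching_car_mileage_numbers.py | is_incrementing
-- ===== SOURCE A (Python) =====
-- def is_incrementing(number: int) -> bool:
--     for i in range(1, len(str(number))):
--         n1 = int(str(number)[i - 1])
--         n2 = int(str(number)[i])
--         if n2 == 0:
--             n2 = 10
--         if n1 + 1 != n2:
--             return False
--     return True
-- ===== SOURCE B (Python) =====
-- def is_incrementing(number: int) -> bool:
--     s = str(number)
--     start = int(s[0])
--     expected = ''.join(str((start + k) % 10) for k in range(len(s)))
--     return s == expected
-- ===== Notes on version B (the rewrite author's own statement) =====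
-- stated objective: simpler
-- what changed: Replaces the early-returning pairwise digit comparison loop by constructing the expected incrementing digit string from the first digit and testing string equality.
-- outside the precondition, e.g. on is_incrementing(-5): A raises ValueError, B raises ValueError
import Mathlib
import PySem

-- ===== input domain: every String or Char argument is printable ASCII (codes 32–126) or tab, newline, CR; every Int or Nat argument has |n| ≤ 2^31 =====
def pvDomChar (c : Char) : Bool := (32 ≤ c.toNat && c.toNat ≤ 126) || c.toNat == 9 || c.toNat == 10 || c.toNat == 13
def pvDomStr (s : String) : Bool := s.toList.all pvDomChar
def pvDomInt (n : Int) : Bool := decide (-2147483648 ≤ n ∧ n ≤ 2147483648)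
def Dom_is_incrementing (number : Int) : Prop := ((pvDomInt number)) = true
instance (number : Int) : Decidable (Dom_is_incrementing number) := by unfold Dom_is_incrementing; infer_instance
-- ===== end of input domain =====

-- B replaces A's early-returning pairwise digit loop by building the expected
-- incrementing string from the first digit and comparing for equality (objective: simpler).

-- ===== PORT A =====
-- int(str(number)[i]) : index (IndexError → none) then int() of the 1-char string
-- (ValueError → none); outside Pre_ (negative numbers) A raises, so the .getD 0
-- default is never relied on by the claim.
def pvDigAt (s : List Char) (i : Int) : Int :=
  ((PySem.List.pyGet? s i).bind (fun c => PySem.Int.ofChars? [c])).getD 0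

-- the for-loop over range(1, len(str(number))) with early return False
def pvALoop (s : List Char) : List Int → Bool
  | [] => true
  | i :: rest =>
    let n1 := pvDigAt s (i - 1)
    let n2 := pvDigAt s i
    let n2 := if n2 = 0 then 10 else n2
    if n1 + 1 ≠ n2 then false else pvALoop s rest

def is_incrementing (number : Int) : Bool :=
  pvALoop (PySem.Int.toChars number)
    (PySem.List.pyRange 1 ((PySem.Int.toChars number).length : Int) 1)

-- ===== PORT B =====
def is_incrementing_alt (number : Int) : Bool :=
  let s := PySem.Int.toChars number
  let start := ((PySem.List.pyGet? s 0).bind (fun c => PySem.Int.ofChars? [c])).getD 0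
  let expected := (PySem.List.pyRange 0 (s.length : Int) 1).flatMap
    (fun k => PySem.Int.toChars (PySem.Int.mod (start + k) 10))
  s == expected

-- ===== PRECONDITION & SPEC =====
-- A raises ValueError on every negative number (int('-') on the sign character), so
-- Pre_ admits exactly the nonnegative inputs; B raises there too.
def Pre_is_incrementing (number : Int) : Prop := 0 ≤ number
instance (number : Int) : Decidable (Pre_is_incrementing number) := by
  unfold Pre_is_incrementing; infer_instance

def pvWitness_is_incrementing : Int := 1234

def Spec_is_incrementing (number : Int) (out : Bool) : Prop := out = is_incrementing_alt number
instance (number : Int) (out : Bool) : Decidable (Spec_is_incrementing number out) := by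
  unfold Spec_is_incrementing; infer_instance

-- ===== CLAIM (what is proved, stated in full; the proofs are below) =====
def Claim_equal_is_incrementing : Prop := ∀ (number : Int), Dom_is_incrementing number →
  Pre_is_incrementing number → Spec_is_incrementing number (is_incrementing number)

-- ===== LEMMAS AND PROOFS =====

def pvIsDig (c : Char) : Prop := ∃ d : Nat, d < 10 ∧ c = Nat.digitChar d

def pvVal (c : Char) : Int := (c.toNat : Int) - 48

lemma pv_val_digitChar {d : Nat} (hd : d < 10) : pvVal (Nat.digitChar d) = (d : Int) := by
  interval_cases d <;> decide

lemma pv_digitChar_inj {d e : Nat} (hd : d < 10) (he : e < 10)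
    (h : Nat.digitChar d = Nat.digitChar e) : d = e := by
  have := congrArg pvVal h
  rw [pv_val_digitChar hd, pv_val_digitChar he] at this
  exact_mod_cast this

lemma pv_ofChars_digit {c : Char} (hc : pvIsDig c) :
    PySem.Int.ofChars? [c] = some (pvVal c) := by
  obtain ⟨d, hd, rfl⟩ := hc
  interval_cases d <;> decide

lemma pv_val_bounds {c : Char} (hc : pvIsDig c) : 0 ≤ pvVal c ∧ pvVal c < 10 := by
  obtain ⟨d, hd, rfl⟩ := hc
  rw [pv_val_digitChar hd]
  omega

lemma pv_toDigitsCore_isDig : ∀ (f n : Nat) (l : List Char), (∀ c ∈ l, pvIsDig c) →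
    ∀ c ∈ Nat.toDigitsCore 10 f n l, pvIsDig c := by
  intro f
  induction f with
  | zero => intro n l hl c hc; exact hl c hc
  | succ f ih =>
    intro n l hl c hc
    rw [Nat.toDigitsCore] at hc
    have hdig : pvIsDig (Nat.digitChar (n % 10)) := ⟨n % 10, Nat.mod_lt _ (by norm_num), rfl⟩
    by_cases h : n / 10 = 0
    · simp only [h, if_pos rfl] at hc
      rcases List.mem_cons.mp hc with h' | h'
      · exact h' ▸ hdig
      · exact hl c h'
    · simp only [if_neg h] at hc
      exact ih (n / 10) _ (by
        intro c' hc'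
        rcases List.mem_cons.mp hc' with h' | h'
        · exact h' ▸ hdig
        · exact hl c' h') c hc

lemma pv_toDigitsCore_len : ∀ (f n : Nat) (l : List Char),
    l.length ≤ (Nat.toDigitsCore 10 f n l).length := by
  intro f
  induction f with
  | zero => intro n l; simp [Nat.toDigitsCore]
  | succ f ih =>
    intro n l
    rw [Nat.toDigitsCore]
    by_cases h : n / 10 = 0
    · simp [h]
    · simp only [if_neg h]
      calc l.length ≤ (Nat.digitChar (n % 10) :: l).length := by simp
        _ ≤ _ := ih _ _

lemma pv_toDigits_ne_nil (n : Nat) : Nat.toDigits 10 n ≠ [] := by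
  rw [Nat.toDigits, Nat.toDigitsCore]
  by_cases h : n / 10 = 0
  · simp [h]
  · simp only [if_neg h]
    intro hnil
    have := pv_toDigitsCore_len n (n / 10) [Nat.digitChar (n % 10)]
    rw [hnil] at this
    simp at this

lemma pv_toDigits_isDig (n : Nat) : ∀ c ∈ Nat.toDigits 10 n, pvIsDig c := by
  intro c hc
  exact pv_toDigitsCore_isDig (n + 1) n [] (by simp) c hc

-- str((start+k)%10) produces the single digit character
lemma pv_toChars_small {m : Int} (h0 : 0 ≤ m) (h1 : m < 10) :
    PySem.Int.toChars m = [Nat.digitChar m.toNat] := by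
  obtain ⟨k, rfl⟩ := Int.eq_ofNat_of_zero_le h0
  have hk : k < 10 := by exact_mod_cast h1
  interval_cases k <;> decide

lemma pv_digAt_eq (s : List Char) (hdig : ∀ c ∈ s, pvIsDig c) (k : Nat) (hk : k < s.length) :
    pvDigAt s (k : Int) = pvVal s[k] := by
  rw [pvDigAt, PySem.List.pyGet?_eq_some_getElem s (by positivity) (by exact_mod_cast hk)]
  simp only [Option.bind_some, Int.toNat_natCast]
  rw [pv_ofChars_digit (hdig _ (List.getElem_mem _))]
  rfl

def pvPairOk (s : List Char) (i : Int) : Prop :=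
  pvDigAt s (i - 1) + 1 = (if pvDigAt s i = 0 then 10 else pvDigAt s i)

lemma pv_aloop_iff (s : List Char) (b : Int) : ∀ (n : Nat) (a : Int), (b - a).toNat = n →
    (pvALoop s (PySem.List.pyRange a b 1) = true ↔ ∀ i : Int, a ≤ i → i < b → pvPairOk s i) := by
  intro n
  induction n with
  | zero =>
    intro a ha
    rw [PySem.List.pyRange_one_eq_nil (by omega)]
    simp only [pvALoop, true_iff]
    intro i h1 h2; omega
  | succ n ih =>
    intro a ha
    rw [PySem.List.pyRange_one_cons (by omega)]
    simp only [pvALoop]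
    by_cases h : pvDigAt s (a - 1) + 1 ≠ (if pvDigAt s a = 0 then 10 else pvDigAt s a)
    · simp only [if_pos h]
      constructor
      · intro hfalse; exact absurd hfalse (by simp)
      · intro hall
        exact absurd (hall a le_rfl (by omega)) h
    · simp only [if_neg h]
      rw [ih (a + 1) (by omega)]
      push_neg at h
      constructor
      · intro hall i h1 h2
        rcases eq_or_lt_of_le h1 with rfl | h1'
        · exact h
        · exact hall i (by omega) h2
      · intro hall i h1 h2
        exact hall i (by omega) h2

lemma pv_pairOk_iff (s : List Char) (hdig : ∀ c ∈ s, pvIsDig c) (k : Nat)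
    (hk1 : 1 ≤ k) (hk : k < s.length) :
    pvPairOk s (k : Int) ↔ pvVal s[k] = (pvVal s[k - 1] + 1) % 10 := by
  have hk' : k - 1 < s.length := by omega
  have hcast : ((k : Int) - 1) = ((k - 1 : Nat) : Int) := by omega
  rw [pvPairOk, hcast, pv_digAt_eq s hdig k hk, pv_digAt_eq s hdig (k - 1) hk']
  have hb1 := pv_val_bounds (hdig _ (List.getElem_mem hk))
  have hb2 := pv_val_bounds (hdig _ (List.getElem_mem hk'))
  constructor
  · intro h
    split_ifs at h with h' <;> omega
  · intro h
    split_ifs with h' <;> omega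

-- chain-from-start characterisation: pairwise steps ↔ indexed from the first digit
lemma pv_chain_iff (s : List Char) (hdig : ∀ c ∈ s, pvIsDig c) (hne : s ≠ []) :
    ((∀ i : Int, 1 ≤ i → i < (s.length : Int) → pvPairOk s i) ↔
      ∀ (k : Nat) (hk : k < s.length), pvVal (s[k]'hk) =
        (pvVal (s[0]'(List.length_pos_of_ne_nil hne)) + k) % 10) := by
  have h0 : 0 < s.length := List.length_pos_of_ne_nil hne
  constructor
  · intro hpair k
    induction k with
    | zero =>
      intro hk
      have := pv_val_bounds (hdig _ (List.getElem_mem h0))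
      omega
    | succ k ih =>
      intro hk
      have hk' : k < s.length := by omega
      have h1 := ih hk'
      have hp : pvPairOk s (((k + 1 : Nat) : Int)) := by
        have := hpair ((k : Int) + 1) (by omega) (by omega)
        rwa [show ((k : Int) + 1) = ((k + 1 : Nat) : Int) by push_cast; ring] at this
      have h2 := (pv_pairOk_iff s hdig (k + 1) (by omega) hk).mp hp
      simp only [Nat.add_sub_cancel] at h2
      have hb := pv_val_bounds (hdig _ (List.getElem_mem hk))
      push_cast
      omega
  · intro hall i h1 h2
    lift i to Nat using (by omega) with k
    have hk : k < s.length := by exact_mod_cast h2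
    have hk1 : 1 ≤ k := by exact_mod_cast h1
    rw [pv_pairOk_iff s hdig k hk1 hk]
    have e1 := hall k hk
    have e2 := hall (k - 1) (by omega)
    have hc : ((k - 1 : Nat) : Int) = (k : Int) - 1 := by omega
    rw [hc] at e2
    omega

lemma pv_flatMap_singleton {α β : Type} (l : List α) (g : α → β) :
    l.flatMap (fun a => [g a]) = l.map g := by
  induction l with
  | nil => rfl
  | cons x xs ih => simp [List.flatMap_cons, ih]

lemma pv_char_iff {c : Char} (hc : pvIsDig c) (m : Int) (h0 : 0 ≤ m) (h1 : m < 10) :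
    c = Nat.digitChar m.toNat ↔ pvVal c = m := by
  obtain ⟨d, hd, rfl⟩ := hc
  have hm : m.toNat < 10 := by omega
  constructor
  · intro h
    have hdm : d = m.toNat := pv_digitChar_inj hd hm h
    rw [pv_val_digitChar hd, hdm]
    omega
  · intro h
    rw [pv_val_digitChar hd] at h
    have hdm : d = m.toNat := by omega
    rw [hdm]

lemma pv_main (s : List Char) (hne : s ≠ []) (hdig : ∀ c ∈ s, pvIsDig c) :
    pvALoop s (PySem.List.pyRange 1 (s.length : Int) 1) =
      (s == (PySem.List.pyRange 0 (s.length : Int) 1).flatMap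
        (fun k => PySem.Int.toChars (PySem.Int.mod
          ((((PySem.List.pyGet? s 0).bind (fun c => PySem.Int.ofChars? [c])).getD 0) + k) 10))) := by
  have h0 : 0 < s.length := List.length_pos_of_ne_nil hne
  have hstart : ((PySem.List.pyGet? s 0).bind (fun c => PySem.Int.ofChars? [c])).getD 0
      = pvVal (s[0]'h0) := by
    rw [PySem.List.pyGet?_eq_some_getElem s le_rfl (by exact_mod_cast h0)]
    simp only [Option.bind_some, Int.toNat_zero]
    rw [pv_ofChars_digit (hdig _ (List.getElem_mem h0))]
    rfl
  rw [hstart]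
  have hb0 := pv_val_bounds (hdig _ (List.getElem_mem h0))
  have hfmod : ∀ x : Int, PySem.Int.mod x 10 = x % 10 := by
    intro x
    simp [PySem.Int.mod, Int.fmod_eq_emod]
  have hpiece : (fun k => PySem.Int.toChars (PySem.Int.mod (pvVal (s[0]'h0) + k) 10))
      = (fun k : Int => [Nat.digitChar ((pvVal (s[0]'h0) + k) % 10).toNat]) := by
    funext k
    rw [hfmod, pv_toChars_small (Int.emod_nonneg _ (by norm_num))
      (Int.emod_lt_of_pos _ (by norm_num))]
  have hexp : (PySem.List.pyRange 0 (s.length : Int) 1).flatMap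
      (fun k => PySem.Int.toChars (PySem.Int.mod (pvVal (s[0]'h0) + k) 10))
      = (List.range s.length).map
        (fun k : Nat => Nat.digitChar ((pvVal (s[0]'h0) + (k : Int)) % 10).toNat) := by
    rw [hpiece, PySem.List.pyRange_one]
    simp only [List.flatMap_map, Int.sub_zero, Int.toNat_natCast, Int.zero_add]
    exact pv_flatMap_singleton _ _
  rw [hexp, Bool.eq_iff_iff, beq_iff_eq,
    pv_aloop_iff s (s.length : Int) ((s.length : Int) - 1).toNat 1 rfl,
    pv_chain_iff s hdig hne]
  constructor
  · intro hall
    apply List.ext_getElem (by simp)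
    intro k hk1 hk2
    simp only [List.getElem_map, List.getElem_range]
    exact (pv_char_iff (hdig _ (List.getElem_mem hk1)) _
      (Int.emod_nonneg _ (by norm_num)) (Int.emod_lt_of_pos _ (by norm_num))).mpr (hall k hk1)
  · intro heq k hk
    have hk2 : k < ((List.range s.length).map
        (fun k : Nat => Nat.digitChar ((pvVal (s[0]'h0) + (k : Int)) % 10).toNat)).length := by
      simpa using hk
    have := List.getElem_of_eq heq hk
    simp only [List.getElem_map, List.getElem_range] at this
    exact (pv_char_iff (hdig _ (List.getElem_mem hk)) _
      (Int.emod_nonneg _ (by norm_num)) (Int.emod_lt_of_pos _ (by norm_num))).mp this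

-- ===== VERDICT (by name: the statement is the Claim_ definition above) =====
theorem is_incrementing_spec : Claim_equal_is_incrementing := by
  intro number _ hpre
  unfold Spec_is_incrementing
  simp only [is_incrementing, is_incrementing_alt]
  have hneg : ¬ number < 0 := by
    have : (0 : Int) ≤ number := hpre
    omega
  have hs : PySem.Int.toChars number = Nat.toDigits 10 number.toNat := by
    rw [PySem.Int.toChars, if_neg hneg]
  rw [hs]
  exact pv_main _ (pv_toDigits_ne_nil _) (pv_toDigits_isDig _)
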